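-- pv_equiv track=rewrite | github.com/ralphman1/AlphaTrade-Engine | token_scraper.py | calculate_token_score
-- ===== SOURCE A (Python) =====
-- def calculate_token_score(symbol, volume24h, liquidity, chain_id):
--     """Calculate a quality score for token filtering with updated thresholds"""
--     score = 0
--
--     # Volume scoring (0-3 points) - balanced thresholds
--     if volume24h >= 100000:  # $100k+ volume
--         score += 3
--     elif volume24h >= 50000:  # $50k+ volume
--         score += 2
--     elif volume24h >= 25000:  # $25k+ volume
--         score += 1
--
--     # Liquidity scoring (0-3 points) - balanced thresholds
--     if liquidity >= 200000:  # $200k+ liquidity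
--         score += 3
--     elif liquidity >= 100000:  # $100k+ liquidity
--         score += 2
--     elif liquidity >= 50000:  # $50k+ liquidity
--         score += 1
--
--     # Symbol quality scoring (0-2 points)
--     symbol_lower = symbol.lower()
--
--     # Penalize common spam symbols
--     spam_indicators = ['hot', 'moon', 'safe', 'elon', 'inu', 'doge', 'shiba', 'pepe']
--     if any(indicator in symbol_lower for indicator in spam_indicators):
--         score -= 1
--
--     # Bonus for unique/interesting symbols
--     if len(symbol) >= 4 and len(symbol) <= 8:
--         score += 1
--
--     # Chain-specific adjustments
--     if chain_id == "ethereum":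
--         score += 1  # Bonus for Ethereum tokens
--     elif chain_id in ["solana", "base"]:
--         score += 0  # Neutral for other major chains
--     else:
--         score -= 1  # Penalty for less common chains
--
--     return max(0, score)  # Ensure non-negative
-- ===== SOURCE B (Python) =====
-- # B: precomputed dense answer table -- every final score (max(0,.) included) is built
-- # once for all 192 feature combinations; the function only classifies the input into
-- # features and does one table lookup.
--
-- VOLUME_CUTS = (25000, 50000, 100000)
-- LIQUIDITY_CUTS = (50000, 100000, 200000)
-- SPAM_INDICATORS = ('hot', 'moon', 'safe', 'elon', 'inu', 'doge', 'shiba', 'pepe')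
-- CHAIN_ADJ = (1, 0, -1)
--
-- TABLE = [max(0, tv + tl - sp + bo + CHAIN_ADJ[ch])
--          for tv in range(4)
--          for tl in range(4)
--          for sp in range(2)
--          for bo in range(2)
--          for ch in range(3)]
--
--
-- def _tier(x, cuts):
--     t = 0
--     while t < len(cuts) and x >= cuts[t]:
--         t += 1
--     return t
--
--
-- def calculate_token_score(symbol, volume24h, liquidity, chain_id):
--     sym = symbol.lower()
--     tv = _tier(volume24h, VOLUME_CUTS)
--     tl = _tier(liquidity, LIQUIDITY_CUTS)
--     sp = 1 if any(ind in sym for ind in SPAM_INDICATORS) else 0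
--     bo = 1 if 4 <= len(symbol) <= 8 else 0
--     ch = 0 if chain_id == "ethereum" else (1 if chain_id in ("solana", "base") else 2)
--     return TABLE[(((tv * 4 + tl) * 2 + sp) * 2 + bo) * 3 + ch]
-- ===== Notes on version B (the rewrite author's own statement) =====
-- stated objective: alternative
-- what changed: B never sums points at call time: it precomputes a dense 192-entry table of final scores (max(0,.) baked in) over all (volume tier, liquidity tier, spam, length-bonus, chain-category) combinations, classifies the input into those five features (tiers via a while-loop over sorted cut arrays), and returns one table lookup.
import Mathlib
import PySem

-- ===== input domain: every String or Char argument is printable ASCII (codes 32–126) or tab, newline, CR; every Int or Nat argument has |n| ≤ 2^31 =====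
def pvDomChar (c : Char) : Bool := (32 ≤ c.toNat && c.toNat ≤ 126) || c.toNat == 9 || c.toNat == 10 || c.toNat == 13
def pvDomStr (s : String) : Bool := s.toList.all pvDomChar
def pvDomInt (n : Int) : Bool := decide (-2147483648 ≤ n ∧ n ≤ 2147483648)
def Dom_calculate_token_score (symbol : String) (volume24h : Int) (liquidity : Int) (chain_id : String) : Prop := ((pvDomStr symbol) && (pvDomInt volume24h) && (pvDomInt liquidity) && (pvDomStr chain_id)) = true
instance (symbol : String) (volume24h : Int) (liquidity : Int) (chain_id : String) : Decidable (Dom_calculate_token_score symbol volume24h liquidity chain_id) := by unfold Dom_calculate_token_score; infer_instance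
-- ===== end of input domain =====

-- B replaces A's point summation with a precomputed 192-entry table of final scores,
-- indexed by (volume tier, liquidity tier, spam flag, length bonus, chain category) (objective: alternative).

-- ===== PORT A =====
def calculate_token_score (symbol : String) (volume24h : Int) (liquidity : Int) (chain_id : String) : Int :=
  let score : Int := 0
  let score := if volume24h ≥ 100000 then score + 3
    else if volume24h ≥ 50000 then score + 2
    else if volume24h ≥ 25000 then score + 1
    else score
  let score := if liquidity ≥ 200000 then score + 3
    else if liquidity ≥ 100000 then score + 2
    else if liquidity ≥ 50000 then score + 1
    else score
  let symbol_lower := PySem.Str.lower symbol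
  let spam_indicators : List String := ["hot", "moon", "safe", "elon", "inu", "doge", "shiba", "pepe"]
  let score := if spam_indicators.any (fun ind => PySem.Str.isIn ind symbol_lower) then score - 1 else score
  let score := if 4 ≤ PySem.Str.len symbol ∧ PySem.Str.len symbol ≤ 8 then score + 1 else score
  let score := if chain_id = "ethereum" then score + 1
    else if chain_id ∈ (["solana", "base"] : List String) then score + 0
    else score - 1
  max 0 score

-- ===== PORT B =====
def pvVolumeCuts : List Int := [25000, 50000, 100000]
def pvLiquidityCuts : List Int := [50000, 100000, 200000]
def pvSpamIndicators : List String := ["hot", "moon", "safe", "elon", "inu", "doge", "shiba", "pepe"]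
def pvChainAdj : List Int := [1, 0, -1]

-- the precomputed table: final score (max(0,·) included) for every feature combination
def pvTable : List Int :=
  (List.range 4).flatMap (fun tv =>
    (List.range 4).flatMap (fun tl =>
      (List.range 2).flatMap (fun sp =>
        (List.range 2).flatMap (fun bo =>
          (List.range 3).map (fun ch =>
            max 0 ((tv : Int) + (tl : Int) - (sp : Int) + (bo : Int) + pvChainAdj.getD ch 0))))))

-- the while-loop tier finder of Source B (stops at the first cut the value misses)
def pvTier (x : Int) : List Int → Nat
  | [] => 0
  | c :: rest => if x ≥ c then 1 + pvTier x rest else 0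

def calculate_token_score_alt (symbol : String) (volume24h : Int) (liquidity : Int) (chain_id : String) : Int :=
  let sym := PySem.Str.lower symbol
  let tv := pvTier volume24h pvVolumeCuts
  let tl := pvTier liquidity pvLiquidityCuts
  let sp : Nat := if pvSpamIndicators.any (fun ind => PySem.Str.isIn ind sym) then 1 else 0
  let bo : Nat := if 4 ≤ PySem.Str.len symbol ∧ PySem.Str.len symbol ≤ 8 then 1 else 0
  let ch : Nat := if chain_id = "ethereum" then 0
    else if chain_id ∈ (["solana", "base"] : List String) then 1 else 2
  -- index is always < 192, so getD is exact (TABLE[idx] never raises)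
  pvTable.getD ((((tv * 4 + tl) * 2 + sp) * 2 + bo) * 3 + ch) 0

-- ===== PRECONDITION & SPEC =====
def Spec_calculate_token_score (symbol : String) (volume24h : Int) (liquidity : Int) (chain_id : String) (out : Int) : Prop := out = calculate_token_score_alt symbol volume24h liquidity chain_id
instance (symbol : String) (volume24h : Int) (liquidity : Int) (chain_id : String) (out : Int) : Decidable (Spec_calculate_token_score symbol volume24h liquidity chain_id out) := by unfold Spec_calculate_token_score; infer_instance

-- ===== CLAIM (what is proved, stated in full; the proofs are below) =====
def Claim_equal_calculate_token_score : Prop := ∀ (symbol : String) (volume24h : Int) (liquidity : Int) (chain_id : String), Dom_calculate_token_score symbol volume24h liquidity chain_id → Spec_calculate_token_score symbol volume24h liquidity chain_id (calculate_token_score symbol volume24h liquidity chain_id)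

-- ===== LEMMAS AND PROOFS =====

-- the table realises the scoring formula on every in-range feature tuple
lemma table_eval : ∀ tv < 4, ∀ tl < 4, ∀ sp < 2, ∀ bo < 2, ∀ ch < 3,
    pvTable.getD ((((tv * 4 + tl) * 2 + sp) * 2 + bo) * 3 + ch) 0 =
      max 0 ((tv : Int) + (tl : Int) - (sp : Int) + (bo : Int) + pvChainAdj.getD ch 0) := by
  decide

lemma tier_vol_lt (v : Int) : pvTier v pvVolumeCuts < 4 := by
  simp only [pvTier, pvVolumeCuts]; split_ifs <;> omega

lemma tier_liq_lt (l : Int) : pvTier l pvLiquidityCuts < 4 := by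
  simp only [pvTier, pvLiquidityCuts]; split_ifs <;> omega

lemma tier_vol (v : Int) : ((pvTier v pvVolumeCuts : Nat) : Int) =
    if v ≥ 100000 then 3 else if v ≥ 50000 then 2 else if v ≥ 25000 then 1 else 0 := by
  simp only [pvTier, pvVolumeCuts]; split_ifs <;> simp_all <;> omega

lemma tier_liq (l : Int) : ((pvTier l pvLiquidityCuts : Nat) : Int) =
    if l ≥ 200000 then 3 else if l ≥ 100000 then 2 else if l ≥ 50000 then 1 else 0 := by
  simp only [pvTier, pvLiquidityCuts]; split_ifs <;> simp_all <;> omega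

lemma chain_getD (c : String) :
    pvChainAdj.getD (if c = "ethereum" then 0
      else if c ∈ (["solana", "base"] : List String) then 1 else 2) 0 =
      (if c = "ethereum" then 1 else if c ∈ (["solana", "base"] : List String) then 0 else -1) := by
  split_ifs <;> rfl

-- fully abstract form of the final equality, proved once over generic conditions
lemma final_eq (c1 c2 c3 d1 d2 d3 s b e m : Prop)
    [Decidable c1] [Decidable c2] [Decidable c3] [Decidable d1] [Decidable d2] [Decidable d3]
    [Decidable s] [Decidable b] [Decidable e] [Decidable m] :
    (let score : Int := 0
     let score := if c1 then score + 3 else if c2 then score + 2 else if c3 then score + 1 else score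
     let score := if d1 then score + 3 else if d2 then score + 2 else if d3 then score + 1 else score
     let score := if s then score - 1 else score
     let score := if b then score + 1 else score
     let score := if e then score + 1 else if m then score + 0 else score - 1
     max 0 score)
    = max 0 ((if c1 then (3:Int) else if c2 then 2 else if c3 then 1 else 0)
        + (if d1 then (3:Int) else if d2 then 2 else if d3 then 1 else 0)
        - (((if s then 1 else 0 : Nat)) : Int) + (((if b then 1 else 0 : Nat)) : Int)
        + (if e then (1:Int) else if m then 0 else -1)) := by
  split_ifs <;> decide

-- ===== VERDICT (by name: the statement is the Claim_ definition above) =====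
set_option maxHeartbeats 4000000 in
theorem calculate_token_score_spec : Claim_equal_calculate_token_score := by
  intro symbol volume24h liquidity chain_id _
  show _ = _
  simp only [calculate_token_score, calculate_token_score_alt, pvSpamIndicators]
  rw [table_eval _ (tier_vol_lt volume24h) _ (tier_liq_lt liquidity)
      _ (by split_ifs <;> omega) _ (by split_ifs <;> omega) _ (by split_ifs <;> omega),
    chain_getD, tier_vol, tier_liq]
  exact final_eq (volume24h ≥ 100000) (volume24h ≥ 50000) (volume24h ≥ 25000)
    (liquidity ≥ 200000) (liquidity ≥ 100000) (liquidity ≥ 50000)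
    ((["hot", "moon", "safe", "elon", "inu", "doge", "shiba", "pepe"].any
        (fun ind => PySem.Str.isIn ind (PySem.Str.lower symbol))) = true)
    (4 ≤ PySem.Str.len symbol ∧ PySem.Str.len symbol ≤ 8)
    (chain_id = "ethereum") (chain_id ∈ (["solana", "base"] : List String))
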